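-- pv_equiv track=rewrite | github.com/spacegraphcats/spacegraphcats | spacegraphcats/search/search_utils.py | decorate_catlas_with_shadow_sizes
-- ===== SOURCE A (Python) =====
-- def decorate_catlas_with_shadow_sizes(layer1_to_cdbg, dag, dag_levels):
--     x = []
--     for (node_id, level) in dag_levels.items():
--         x.append((level, node_id))
--     x.sort()
--
--     node_shadow_sizes = {}
--     for level, node_id in x:
--         if level == 1:
--             node_shadow_sizes[node_id] = len(layer1_to_cdbg[node_id])
--         else:
--             sub_size = 0
--             for child_id in dag[node_id]:
--                 sub_size += node_shadow_sizes[child_id]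
--             node_shadow_sizes[node_id] = sub_size
--
--     return node_shadow_sizes
-- ===== SOURCE B (Python) =====
-- def decorate_catlas_with_shadow_sizes(layer1_to_cdbg, dag, dag_levels):
--     node_shadow_sizes = {}
--
--     def size(node_id):
--         if node_id in node_shadow_sizes:
--             return node_shadow_sizes[node_id]
--         if dag_levels[node_id] == 1:
--             s = len(layer1_to_cdbg[node_id])
--         else:
--             s = 0
--             for child_id in dag[node_id]:
--                 s += size(child_id)
--         node_shadow_sizes[node_id] = s
--         return s
--
--     for level, node_id in sorted((lvl, n) for n, lvl in dag_levels.items()):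
--         size(node_id)
--
--     return node_shadow_sizes
-- ===== Notes on version B (the rewrite author's own statement) =====
-- stated objective: alternative
-- what changed: B computes each node's shadow size with a recursive memoized helper that pulls children's sizes on demand, instead of A's iterative bottom-up accumulation that relies on the level order having already filled the table; the (level, node) sort is kept only to fix the returned dict's key order.
import Mathlib
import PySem

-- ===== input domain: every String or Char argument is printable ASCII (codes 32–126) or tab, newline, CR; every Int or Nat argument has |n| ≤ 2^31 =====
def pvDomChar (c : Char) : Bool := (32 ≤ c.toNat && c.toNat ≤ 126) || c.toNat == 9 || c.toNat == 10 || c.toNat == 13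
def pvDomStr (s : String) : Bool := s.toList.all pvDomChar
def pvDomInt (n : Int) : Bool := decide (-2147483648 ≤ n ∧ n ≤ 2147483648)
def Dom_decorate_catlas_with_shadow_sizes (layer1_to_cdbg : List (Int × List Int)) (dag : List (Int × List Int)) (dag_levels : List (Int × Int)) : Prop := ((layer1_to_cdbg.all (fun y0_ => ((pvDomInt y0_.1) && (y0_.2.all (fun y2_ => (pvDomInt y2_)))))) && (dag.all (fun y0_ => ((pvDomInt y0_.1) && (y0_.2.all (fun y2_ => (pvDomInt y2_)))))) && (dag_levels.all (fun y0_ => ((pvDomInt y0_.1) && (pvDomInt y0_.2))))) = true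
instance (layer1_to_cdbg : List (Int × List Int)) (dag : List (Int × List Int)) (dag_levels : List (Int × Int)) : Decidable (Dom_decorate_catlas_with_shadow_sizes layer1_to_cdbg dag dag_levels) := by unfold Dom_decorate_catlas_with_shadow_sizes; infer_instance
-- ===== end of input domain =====

-- B replaces A's iterative bottom-up table fill by a recursive memoized size() helper
-- (children pulled on demand); the (level, node) sort only fixes the output key order.

-- ===== PORT A =====
def decorate_catlas_with_shadow_sizes (layer1_to_cdbg : List (Int × List Int)) (dag : List (Int × List Int)) (dag_levels : List (Int × Int)) : List (Int × Int) :=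
  -- x = []; for node_id, level in dag_levels.items(): x.append((level, node_id)); x.sort()
  let x0 := dag_levels.foldl (fun acc q => acc ++ [(q.2, q.1)]) []
  let x := PySem.List.sorted2 x0 Prod.fst Prod.snd false
  -- node_shadow_sizes = {}; for level, node_id in x: ...
  let ns := x.foldl (fun (ns : PySem.Dict Int Int) p =>
    if p.1 == 1 then
      ns.insert p.2 (((PySem.Dict.mk layer1_to_cdbg).getD p.2 []).length : Int)
    else
      ns.insert p.2 (((PySem.Dict.mk dag).getD p.2 []).foldl (fun s c => s + ns.getD c 0) 0))
    PySem.Dict.empty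
  ns.items

-- ===== PORT B =====
-- recursive memoized helper size(node_id); fuel only makes the recursion total
-- (inside Pre_ every recursive call is a memo hit, so fuel is never exhausted)
def pvSizeB (l1d dgd : PySem.Dict Int (List Int)) (dld : PySem.Dict Int Int) (fuel : Nat)
    (memo : PySem.Dict Int Int) (n : Int) : PySem.Dict Int Int × Int :=
  match fuel with
  | 0 => (memo, 0)
  | Nat.succ fuel =>
    match memo.get? n with
    | some v => (memo, v)
    | none =>
      let r : PySem.Dict Int Int × Int :=
        if dld.getD n 0 == 1 then
          (memo, ((l1d.getD n []).length : Int))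
        else
          (dgd.getD n []).foldl (fun acc c =>
            let rc := pvSizeB l1d dgd dld fuel acc.1 c
            (rc.1, acc.2 + rc.2)) (memo, 0)
      (r.1.insert n r.2, r.2)

def decorate_catlas_with_shadow_sizes_alt (layer1_to_cdbg : List (Int × List Int)) (dag : List (Int × List Int)) (dag_levels : List (Int × Int)) : List (Int × Int) :=
  -- for level, node_id in sorted((lvl, n) for n, lvl in dag_levels.items()): size(node_id)
  let x := PySem.List.sorted2 (dag_levels.map (fun q => (q.2, q.1))) Prod.fst Prod.snd false
  let ns := x.foldl (fun memo p =>
      (pvSizeB (PySem.Dict.mk layer1_to_cdbg) (PySem.Dict.mk dag) (PySem.Dict.mk dag_levels)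
        (dag_levels.length + 1) memo p.2).1)
    PySem.Dict.empty
  ns.items

-- ===== PRECONDITION & SPEC =====
-- Pre_ excludes exactly the inputs on which A raises KeyError: a level-1 node missing from
-- layer1_to_cdbg, a higher node missing from dag, or a child that is not a dag_levels node with a
-- strictly (level, id)-lexicographically smaller pair (so not yet in the table when needed);
-- dag_levels keys must be distinct (it is a Python dict).
def Pre_decorate_catlas_with_shadow_sizes (layer1_to_cdbg : List (Int × List Int)) (dag : List (Int × List Int)) (dag_levels : List (Int × Int)) : Prop :=
  (dag_levels.map Prod.fst).Nodup ∧
  ∀ q ∈ dag_levels,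
    (q.2 = 1 → q.1 ∈ layer1_to_cdbg.map Prod.fst) ∧
    (q.2 ≠ 1 → q.1 ∈ dag.map Prod.fst ∧
      ∀ c ∈ (PySem.Dict.mk dag).getD q.1 [],
        ∃ r ∈ dag_levels, r.1 = c ∧ (r.2 < q.2 ∨ (r.2 = q.2 ∧ r.1 < q.1)))
instance (layer1_to_cdbg : List (Int × List Int)) (dag : List (Int × List Int)) (dag_levels : List (Int × Int)) : Decidable (Pre_decorate_catlas_with_shadow_sizes layer1_to_cdbg dag dag_levels) := by unfold Pre_decorate_catlas_with_shadow_sizes; infer_instance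

def pvWitness_decorate_catlas_with_shadow_sizes : (List (Int × List Int)) × (List (Int × List Int)) × (List (Int × Int)) :=
  ([(10, [100, 101]), (11, [100])], [(2, [10, 11, 10])], [(10, 1), (11, 1), (2, 2)])

def Spec_decorate_catlas_with_shadow_sizes (layer1_to_cdbg : List (Int × List Int)) (dag : List (Int × List Int)) (dag_levels : List (Int × Int)) (out : List (Int × Int)) : Prop := out = decorate_catlas_with_shadow_sizes_alt layer1_to_cdbg dag dag_levels
instance (layer1_to_cdbg : List (Int × List Int)) (dag : List (Int × List Int)) (dag_levels : List (Int × Int)) (out : List (Int × Int)) : Decidable (Spec_decorate_catlas_with_shadow_sizes layer1_to_cdbg dag dag_levels out) := by unfold Spec_decorate_catlas_with_shadow_sizes; infer_instance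

-- ===== CLAIM (what is proved, stated in full; the proofs are below) =====
def Claim_equal_decorate_catlas_with_shadow_sizes : Prop := ∀ (layer1_to_cdbg : List (Int × List Int)) (dag : List (Int × List Int)) (dag_levels : List (Int × Int)), Dom_decorate_catlas_with_shadow_sizes layer1_to_cdbg dag dag_levels → Pre_decorate_catlas_with_shadow_sizes layer1_to_cdbg dag dag_levels → Spec_decorate_catlas_with_shadow_sizes layer1_to_cdbg dag dag_levels (decorate_catlas_with_shadow_sizes layer1_to_cdbg dag dag_levels)

-- ===== LEMMAS AND PROOFS =====

-- sorted2 with two Int keys is sort by the lexicographic product key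
lemma pv_sorted2_eq_sorted_toLex (xs : List (Int × Int)) :
    PySem.List.sorted2 xs Prod.fst Prod.snd false
      = PySem.List.sorted xs (fun p => (toLex p : Int ×ₗ Int)) false := by
  have hbf : (fun (a b : Int × Int) => decide (a.1 < b.1) || (!decide (b.1 < a.1) && decide (a.2 < b.2)))
      = (fun (a b : Int × Int) => decide ((toLex a : Int ×ₗ Int) < toLex b)) := by
    funext a b
    by_cases h1 : a.1 < b.1 <;> by_cases h2 : b.1 < a.1 <;> by_cases h3 : a.2 < b.2 <;>
      simp [Prod.Lex.lt_iff, h1, h2, h3] <;> omega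
  have h1 : PySem.List.sorted2 xs Prod.fst Prod.snd false
      = xs.foldl (fun acc x => PySem.List.insertBy (fun a b =>
          decide (a.1 < b.1) || (!decide (b.1 < a.1) && decide (a.2 < b.2))) x acc) [] := rfl
  rw [h1, hbf, PySem.List.sorted_eq_foldl_insertBy]

-- a memo hit returns immediately
lemma pvSizeB_hit (l1d dgd : PySem.Dict Int (List Int)) (dld : PySem.Dict Int Int)
    (fuel : Nat) (memo : PySem.Dict Int Int) (n : Int) (v : Int)
    (h : memo.get? n = some v) (hf : 1 ≤ fuel) :
    pvSizeB l1d dgd dld fuel memo n = (memo, v) := by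
  cases fuel with
  | zero => omega
  | succ f => simp [pvSizeB, h]

-- folding size() over children that are all memo hits is A's inner sum
lemma pv_fold_children (l1d dgd : PySem.Dict Int (List Int)) (dld : PySem.Dict Int Int)
    (fuel : Nat) (memo : PySem.Dict Int Int) (cs : List Int) (s : Int)
    (h : ∀ c ∈ cs, ∃ v, memo.get? c = some v) (hf : 1 ≤ fuel) :
    cs.foldl (fun acc c =>
        let rc := pvSizeB l1d dgd dld fuel acc.1 c
        (rc.1, acc.2 + rc.2)) (memo, s)
      = (memo, cs.foldl (fun t c => t + memo.getD c 0) s) := by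
  induction cs generalizing s with
  | nil => rfl
  | cons c cs ih =>
    obtain ⟨v, hv⟩ := h c (List.mem_cons_self)
    simp only [List.foldl_cons, pvSizeB_hit l1d dgd dld fuel memo c v hv hf,
      PySem.Dict.getD_of_get?_eq_some _ 0 hv]
    apply ih
    intro c' hc'
    exact h c' (List.mem_cons_of_mem _ hc')

-- main induction: A's direct table fill and B's memoized driver build the same dict
lemma pv_main (l1d dgd : PySem.Dict Int (List Int)) (dld : PySem.Dict Int Int) (fuel : Nat)
    (xs : List (Int × Int)) (memo : PySem.Dict Int Int)
    (hf : 2 ≤ fuel)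
    (hnd : (xs.map Prod.snd).Nodup)
    (hlv : ∀ p ∈ xs, dld.get? p.2 = some p.1)
    (hfresh : ∀ p ∈ xs, memo.get? p.2 = none)
    (hch : ∀ ys p zs, xs = ys ++ p :: zs → p.1 ≠ 1 →
      ∀ c ∈ dgd.getD p.2 [], (∃ v, memo.get? c = some v) ∨ c ∈ ys.map Prod.snd) :
    xs.foldl (fun (ns : PySem.Dict Int Int) p =>
        if p.1 == 1 then
          ns.insert p.2 ((l1d.getD p.2 []).length : Int)
        else
          ns.insert p.2 ((dgd.getD p.2 []).foldl (fun s c => s + ns.getD c 0) 0)) memo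
      = xs.foldl (fun m p => (pvSizeB l1d dgd dld fuel m p.2).1) memo := by
  induction xs generalizing memo with
  | nil => rfl
  | cons p rest ih =>
    obtain ⟨f, rfl⟩ : ∃ f, fuel = f + 1 := ⟨fuel - 1, by omega⟩
    have hmemo : memo.get? p.2 = none := hfresh p List.mem_cons_self
    have hlvp : dld.getD p.2 0 = p.1 :=
      PySem.Dict.getD_of_get?_eq_some _ 0 (hlv p List.mem_cons_self)
    -- the one-step dicts coincide
    have hstep : (pvSizeB l1d dgd dld (f + 1) memo p.2)
        = (memo.insert p.2 (if p.1 == 1 then ((l1d.getD p.2 []).length : Int)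
            else (dgd.getD p.2 []).foldl (fun s c => s + memo.getD c 0) 0),
           (if p.1 == 1 then ((l1d.getD p.2 []).length : Int)
            else (dgd.getD p.2 []).foldl (fun s c => s + memo.getD c 0) 0)) := by
      by_cases h1 : p.1 = 1
      · simp [pvSizeB, hmemo, hlvp, h1]
      · have hchp : ∀ c ∈ dgd.getD p.2 [], ∃ v, memo.get? c = some v := by
          intro c hc
          rcases hch [] p rest rfl h1 c hc with h | h
          · exact h
          · simp at h
        rw [show ((f:Nat) + 1) = Nat.succ f from rfl]
        simp only [pvSizeB, hmemo, hlvp]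
        rw [pv_fold_children l1d dgd dld f memo _ 0 hchp (by omega)]
        simp [h1]
    have hnd' : p.2 ∉ rest.map Prod.snd ∧ (rest.map Prod.snd).Nodup := by
      rw [List.map_cons, List.nodup_cons] at hnd; exact hnd
    have hpnotin : p.2 ∉ rest.map Prod.snd := hnd'.1
    set s : Int := (if p.1 == 1 then ((l1d.getD p.2 []).length : Int)
        else (dgd.getD p.2 []).foldl (fun s c => s + memo.getD c 0) 0) with hs
    have hAhead : (if p.1 == 1 then
          memo.insert p.2 ((l1d.getD p.2 []).length : Int)
        else
          memo.insert p.2 ((dgd.getD p.2 []).foldl (fun s c => s + memo.getD c 0) 0))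
        = memo.insert p.2 s := by
      by_cases h1 : p.1 = 1 <;> simp [hs, h1]
    simp only [List.foldl_cons, hAhead, hstep]
    apply ih (memo.insert p.2 s)
    · exact hnd'.2
    · exact fun q hq => hlv q (List.mem_cons_of_mem _ hq)
    · intro q hq
      have hne : q.2 ≠ p.2 := by
        intro he; exact hpnotin (he ▸ List.mem_map_of_mem hq)
      rw [PySem.Dict.get?_insert_of_ne _ _ hne]
      exact hfresh q (List.mem_cons_of_mem _ hq)
    · intro ys q zs hrest hq1 c hc
      rcases hch (p :: ys) q zs (by simp [hrest]) hq1 c hc with ⟨v, hv⟩ | hmem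
      · left
        have hne : c ≠ p.2 := by intro he; rw [he, hmemo] at hv; simp at hv
        exact ⟨v, by rw [PySem.Dict.get?_insert_of_ne _ _ hne]; exact hv⟩
      · simp only [List.map_cons, List.mem_cons] at hmem
        rcases hmem with he | hmem
        · exact Or.inl ⟨s, he ▸ PySem.Dict.get?_insert_self _ _ _⟩
        · exact Or.inr hmem

-- ===== VERDICT (by name: the statement is the Claim_ definition above) =====
theorem decorate_catlas_with_shadow_sizes_spec : Claim_equal_decorate_catlas_with_shadow_sizes := by
  intro l1 dg dl _hdom hpre
  obtain ⟨hnodup, hcond⟩ := hpre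
  show decorate_catlas_with_shadow_sizes l1 dg dl = decorate_catlas_with_shadow_sizes_alt l1 dg dl
  by_cases hdl0 : dl = []
  · subst hdl0; rfl
  have hdl : 1 ≤ dl.length := by
    cases dl
    · exact absurd rfl hdl0
    · simp
  unfold decorate_catlas_with_shadow_sizes decorate_catlas_with_shadow_sizes_alt
  rw [PySem.List.foldl_append_singleton_eq_map]
  simp only [List.nil_append]
  set xs := PySem.List.sorted2 (dl.map (fun q => (q.2, q.1))) Prod.fst Prod.snd false with hxs
  have hperm : xs.Perm (dl.map (fun q => (q.2, q.1))) := PySem.List.sorted2_perm _ _ _ _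
  have hpermsnd : (xs.map Prod.snd).Perm (dl.map Prod.fst) := by
    have := hperm.map Prod.snd
    simpa [Function.comp] using this
  have hmemxs : ∀ p ∈ xs, (p.2, p.1) ∈ dl := by
    intro p hp
    have : p ∈ dl.map (fun q => (q.2, q.1)) := hperm.mem_iff.mp hp
    obtain ⟨q, hq, he⟩ := List.mem_map.mp this
    rcases he
    simpa using hq
  congr 1
  apply pv_main (PySem.Dict.mk l1) (PySem.Dict.mk dg) (PySem.Dict.mk dl) (dl.length + 1) xs
      PySem.Dict.empty (by omega)
  · exact hpermsnd.nodup_iff.mpr hnodup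
  · intro p hp
    apply PySem.Dict.get?_of_mem_items (PySem.Dict.mk dl) (hmemxs p hp)
    simpa [PySem.Dict.keys] using hnodup
  · intro p _; exact PySem.Dict.get?_empty _
  · intro ys p zs hsplit hp1 c hc
    right
    have hpxs : p ∈ xs := by rw [hsplit]; simp
    obtain ⟨r, hr, hrc, hlex⟩ := ((hcond _ (hmemxs p hpxs)).2 hp1).2 c hc
    have hexs : (r.2, r.1) ∈ xs := hperm.mem_iff.mpr (List.mem_map_of_mem hr)
    -- sortedness: everything at or after p has key ≥ key p, but (r.2, r.1) < p
    have hpw : xs.Pairwise (fun a b => (toLex a : Int ×ₗ Int) ≤ toLex b) := by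
      rw [hxs, pv_sorted2_eq_sorted_toLex]
      exact PySem.List.sorted_pairwise _ _
    have hlt : (toLex (r.2, r.1) : Int ×ₗ Int) < toLex p := by
      rcases hlex with h | ⟨h1, h2⟩
      · exact Prod.Lex.lt_iff.mpr (Or.inl h)
      · exact Prod.Lex.lt_iff.mpr (Or.inr ⟨h1, h2⟩)
    rw [hsplit] at hpw hexs
    rcases (List.mem_append.mp hexs) with hys | htail
    · rw [← hrc]; exact List.mem_map_of_mem hys
    · exfalso
      rcases List.mem_cons.mp htail with he | hzs
      · rw [he] at hlt; exact lt_irrefl _ hlt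
      · have := (List.pairwise_append.mp hpw).2.1
        have hle : (toLex p : Int ×ₗ Int) ≤ toLex (r.2, r.1) :=
          (List.pairwise_cons.mp this).1 _ hzs
        exact absurd hlt (not_lt.mpr hle)
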